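-- pv_equiv track=rewrite | github.com/KentonLam/Advent-of-Code-2018 | day04_solve.py | parse_guard_sleeps
-- ===== SOURCE A (Python) =====
-- from collections import defaultdict
--
-- def get_time(line):
--     return int(line.split(':')[1].split(']')[0])
--
-- def parse_guard_sleeps(chrono):
--     # mapping from guard number to sleep mapping
--     # sleep mapping is minute to times asleep.
--     guard_hours_asleep = defaultdict(lambda: [0]*60)
--     chrono = list(sorted(chrono))
--
--     time_asleep = None
--
--     for line in chrono:
--         line = line.rstrip()
--         if ' begins shift' in line:
--             code = line.split(' Guard #')[1].replace(' begins shift', '')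
--         elif ' falls asleep' in line:
--             time_asleep = get_time(line)
--         elif ' wakes up' in line:
--             for i in range(time_asleep, get_time(line)):
--                 guard_hours_asleep[code][i] += 1
--
--     return guard_hours_asleep
-- ===== SOURCE B (Python) =====
-- from collections import defaultdict
--
-- def _ev_time(line):
--     return int(line.split(':')[1].split(']')[0])
--
-- def parse_guard_sleeps(chrono):
--     # staged: parse sorted lines into typed events, then pair sleeps with wakes
--     # into per-guard intervals, then build each 60-slot row by counting covers
--     events = []
--     for line in sorted(chrono):
--         line = line.rstrip()
--         if ' begins shift' in line:
--             events.append(('G', line.split(' Guard #')[1].replace(' begins shift', ''), 0))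
--         elif ' falls asleep' in line:
--             events.append(('S', '', _ev_time(line)))
--         elif ' wakes up' in line:
--             events.append(('W', '', _ev_time(line)))
--     intervals = {}          # guard code -> list of (sleep_minute, wake_minute)
--     code = None
--     start = None
--     for kind, name, t in events:
--         if kind == 'G':
--             code = name
--         elif kind == 'S':
--             start = t
--         elif start < t:
--             intervals.setdefault(code, []).append((start, t))
--     result = defaultdict(lambda: [0]*60)
--     for c, ivs in intervals.items():
--         result[c] = [sum(1 for s, e in ivs if s <= m < e) for m in range(60)]
--     return result
-- ===== Notes on version B (the rewrite author's own statement) =====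
-- stated objective: alternative
-- what changed: B replaces A's single fold that mutates 60-slot count arrays minute by minute with three staged passes: parse the sorted lines into typed events, pair sleep/wake events into per-guard (start,end) intervals, then build each guard's 60-minute row by counting covering intervals.
import Mathlib
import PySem

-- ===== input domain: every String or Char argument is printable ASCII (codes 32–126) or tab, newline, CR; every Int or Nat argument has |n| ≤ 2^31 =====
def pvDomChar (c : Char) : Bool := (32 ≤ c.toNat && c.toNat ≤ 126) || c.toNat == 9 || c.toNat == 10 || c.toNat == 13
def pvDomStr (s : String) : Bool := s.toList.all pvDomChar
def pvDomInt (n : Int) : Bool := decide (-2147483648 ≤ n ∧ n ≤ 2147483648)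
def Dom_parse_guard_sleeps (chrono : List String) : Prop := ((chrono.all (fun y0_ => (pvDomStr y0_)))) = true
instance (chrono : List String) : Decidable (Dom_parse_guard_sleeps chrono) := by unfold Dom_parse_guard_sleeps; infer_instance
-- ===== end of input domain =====

-- B works in three staged passes (parse typed events, pair sleeps with wakes into per-guard
-- intervals, build each 60-slot row by counting covering intervals) instead of A's single
-- fold mutating 60-slot count arrays minute by minute (objective: alternative, not faster).

-- shared helper: int(line.split(':')[1].split(']')[0]); none where Python raises
def pvGetTime? (line : String) : Option Int :=
  match PySem.List.pyGet? ((PySem.Str.split? line ":").getD []) 1 with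
  | none => none
  | some part =>
    match PySem.List.pyGet? ((PySem.Str.split? part "]").getD []) 0 with
    | none => none
    | some sub => PySem.Int.ofStr? sub

-- ===== PORT A =====
-- loop body of A; state = (guard_hours_asleep, code, time_asleep); 'none' components/fallthrough
-- arms are where Python has an unbound name or raises (excluded by Pre_)
def pvStepA (st : PySem.Dict String (List Int) × Option String × Option Int) (line0 : String) :
    PySem.Dict String (List Int) × Option String × Option Int :=
  if PySem.Str.isIn " begins shift" (PySem.Str.rstrip line0) then
    match PySem.List.pyGet? ((PySem.Str.split? (PySem.Str.rstrip line0) " Guard #").getD []) 1 with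
    | some part => (st.1, some (PySem.Str.replace part " begins shift" ""), st.2.2)
    | none => st
  else if PySem.Str.isIn " falls asleep" (PySem.Str.rstrip line0) then
    match pvGetTime? (PySem.Str.rstrip line0) with
    | some t => (st.1, st.2.1, some t)
    | none => st
  else if PySem.Str.isIn " wakes up" (PySem.Str.rstrip line0) then
    match pvGetTime? (PySem.Str.rstrip line0), st.2.1, st.2.2 with
    | some e, some code, some s =>
        ((PySem.List.pyRange s e 1).foldl
           (fun d i => d.modify code (List.replicate 60 0)
             (fun l => PySem.List.pySetD l i (PySem.List.pyGetD l i 0 + 1))) st.1,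
         st.2.1, st.2.2)
    | _, _, _ => st
  else st

def parse_guard_sleeps (chrono : List String) : List (String × List Int) :=
  ((PySem.List.sorted chrono (fun s => s) false).foldl pvStepA
    (PySem.Dict.empty, none, none)).1.items

-- ===== PORT B =====
-- typed events, the meaning of the ('G',name,0)/('S','',t)/('W','',t) tuples of Source B
inductive PvEvent : Type
  | guard : String → PvEvent
  | sleep : Int → PvEvent
  | wake : Int → PvEvent
deriving DecidableEq, Repr

-- pass 1 body: classify one line; none = no event appended (or the Python raises, excluded by Pre_)
def pvParseEvent (line0 : String) : Option PvEvent :=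
  if PySem.Str.isIn " begins shift" (PySem.Str.rstrip line0) then
    match PySem.List.pyGet? ((PySem.Str.split? (PySem.Str.rstrip line0) " Guard #").getD []) 1 with
    | some part => some (PvEvent.guard (PySem.Str.replace part " begins shift" ""))
    | none => none
  else if PySem.Str.isIn " falls asleep" (PySem.Str.rstrip line0) then
    (pvGetTime? (PySem.Str.rstrip line0)).map PvEvent.sleep
  else if PySem.Str.isIn " wakes up" (PySem.Str.rstrip line0) then
    (pvGetTime? (PySem.Str.rstrip line0)).map PvEvent.wake
  else none

-- pass 2 body: pair sleeps with wakes into per-guard interval lists; the 'none' fallthroughs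
-- are where Python's 'start < t' / dict key would hit an unbound/None name (excluded by Pre_)
def pvApplyEvent (st : PySem.Dict String (List (Int × Int)) × Option String × Option Int)
    (ev : PvEvent) : PySem.Dict String (List (Int × Int)) × Option String × Option Int :=
  match ev with
  | PvEvent.guard c => (st.1, some c, st.2.2)
  | PvEvent.sleep t => (st.1, st.2.1, some t)
  | PvEvent.wake t =>
    match st.2.1, st.2.2 with
    | some code, some s =>
        if s < t then (st.1.modify code [] (fun l => l ++ [(s, t)]), st.2.1, st.2.2)
        else st
    | _, _ => st

-- pass 3 body: [sum(1 for s, e in ivs if s <= m < e) for m in range(60)]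
def pvRow (ivs : List (Int × Int)) : List Int :=
  (PySem.List.pyRange 0 60 1).map (fun m =>
    (ivs.map (fun p => if p.1 ≤ m ∧ m < p.2 then (1 : Int) else 0)).sum)

def parse_guard_sleeps_alt (chrono : List String) : List (String × List Int) :=
  let events := (PySem.List.sorted chrono (fun s => s) false).filterMap pvParseEvent
  let st := events.foldl pvApplyEvent (PySem.Dict.empty, none, none)
  (st.1.items.foldl (fun r p => r.insert p.1 (pvRow p.2)) PySem.Dict.empty).items

-- ===== PRECONDITION & SPEC =====
-- line classification, mirroring the elif order of the Python
def pvIsBegins (l : String) : Bool := PySem.Str.isIn " begins shift" (PySem.Str.rstrip l)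
def pvIsFalls (l : String) : Bool :=
  !(pvIsBegins l) && PySem.Str.isIn " falls asleep" (PySem.Str.rstrip l)
def pvIsWakes (l : String) : Bool :=
  !(pvIsBegins l) && !(PySem.Str.isIn " falls asleep" (PySem.Str.rstrip l))
    && PySem.Str.isIn " wakes up" (PySem.Str.rstrip l)

-- the minute parsed from the most recent 'falls asleep' line among the preceding lines
def pvLastSleepTime? (past : List String) : Option Int :=
  pvGetTime? (PySem.Str.rstrip ((past.filter pvIsFalls).getLastD ""))

-- well-formedness of one line of the sorted log, given the lines before it: a shift line
-- names a guard, event lines carry a parsable minute, and a wake line is preceded by a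
-- shift line and a sleep line whose non-empty sleep interval lies inside the hour
-- (0 <= start, end <= 60).  Outside that A raises (IndexError/ValueError/TypeError/
-- NameError) or, for negative parsed minutes, places counts by negative-index
-- wraparound, which B does not reproduce (minutes of a real log are 0..59).
def pvLineOk (past : List String) (l : String) : Prop :=
  (pvIsBegins l = true →
    (PySem.List.pyGet? ((PySem.Str.split? (PySem.Str.rstrip l) " Guard #").getD []) 1).isSome = true)
  ∧ (pvIsFalls l = true → (pvGetTime? (PySem.Str.rstrip l)).isSome = true)
  ∧ (pvIsWakes l = true →
      past.any pvIsBegins = true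
      ∧ past.filter pvIsFalls ≠ []
      ∧ (pvLastSleepTime? past).isSome = true
      ∧ (pvGetTime? (PySem.Str.rstrip l)).isSome = true
      ∧ ((pvLastSleepTime? past).getD 0 < (pvGetTime? (PySem.Str.rstrip l)).getD 0 →
          0 ≤ (pvLastSleepTime? past).getD 0
          ∧ (pvGetTime? (PySem.Str.rstrip l)).getD 0 ≤ 60))

def Pre_parse_guard_sleeps (chrono : List String) : Prop :=
  ∀ i (hi : i < (PySem.List.sorted chrono (fun s => s) false).length),
    pvLineOk ((PySem.List.sorted chrono (fun s => s) false).take i)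
      ((PySem.List.sorted chrono (fun s => s) false)[i])
instance (chrono : List String) : Decidable (Pre_parse_guard_sleeps chrono) := by
  unfold Pre_parse_guard_sleeps pvLineOk; infer_instance

def pvWitness_parse_guard_sleeps : List String := ["[1:2] falls asleep"]

def Spec_parse_guard_sleeps (chrono : List String) (out : List (String × List Int)) : Prop := out = parse_guard_sleeps_alt chrono
instance (chrono : List String) (out : List (String × List Int)) : Decidable (Spec_parse_guard_sleeps chrono out) := by unfold Spec_parse_guard_sleeps; infer_instance

-- ===== CLAIM (what is proved, stated in full; the proofs are below) =====
def Claim_equal_parse_guard_sleeps : Prop := ∀ (chrono : List String), Dom_parse_guard_sleeps chrono → Pre_parse_guard_sleeps chrono → Spec_parse_guard_sleeps chrono (parse_guard_sleeps chrono)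

-- ===== LEMMAS AND PROOFS =====

-- proof-only helper: B's parse+apply composed into one per-line step (never used by the ports)
def pvStepB (st : PySem.Dict String (List (Int × Int)) × Option String × Option Int)
    (line0 : String) : PySem.Dict String (List (Int × Int)) × Option String × Option Int :=
  match pvParseEvent line0 with
  | some ev => pvApplyEvent st ev
  | none => st

-- a fold over a filterMap is a fold over the source with the composed step
lemma pvFoldl_filterMap {α β σ : Type} (f : α → Option β) (g : σ → β → σ) :
    ∀ (xs : List α) (init : σ),
      (xs.filterMap f).foldl g init
        = xs.foldl (fun s x => match f x with | some b => g s b | none => s) init := by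
  intro xs
  induction xs with
  | nil => intro init; rfl
  | cons x xs ih =>
    intro init
    cases hfx : f x <;> simp [hfx, ih]

-- B's staged fold over the parsed events, re-expressed as a per-line fold with pvStepB
lemma pvFoldl_stepB (xs : List String)
    (init : PySem.Dict String (List (Int × Int)) × Option String × Option Int) :
    (xs.filterMap pvParseEvent).foldl pvApplyEvent init = xs.foldl pvStepB init := by
  rw [pvFoldl_filterMap]
  congr 1
  funext st l
  cases hp : pvParseEvent l <;> simp [pvStepB, hp]

-- A's minute loop on one guard's entry, as a function on the entry value
def pvBumpF (s e : Int) (l : List Int) : List Int :=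
  (PySem.List.pyRange s e 1).foldl
    (fun l i => PySem.List.pySetD l i (PySem.List.pyGetD l i 0 + 1)) l

def pvG (p : String × List (Int × Int)) : String × List Int := (p.1, pvRow p.2)

lemma pvRow_nil : pvRow [] = List.replicate 60 0 := by
  simp [pvRow, List.map_const', PySem.List.length_pyRange_one]

lemma pvLen_row (ivs : List (Int × Int)) : (pvRow ivs).length = 60 := by
  simp [pvRow, PySem.List.length_pyRange_one]

-- a chain of modifies at one key, started on an insert, is one insert
lemma pvFoldl_insert_modify {κ : Type} [BEq κ] [LawfulBEq κ] (k : κ) (d0 : List Int)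
    (f : Int → List Int → List Int) :
    ∀ (xs : List Int) (d : PySem.Dict κ (List Int)) (v : List Int),
      xs.foldl (fun d i => d.modify k d0 (f i)) (d.insert k v)
        = d.insert k (xs.foldl (fun v i => f i v) v) := by
  intro xs
  induction xs with
  | nil => intro d v; simp
  | cons x xs ih =>
    intro d v
    simp only [List.foldl_cons]
    have h1 : (d.insert k v).modify k d0 (f x) = d.insert k (f x v) := by
      show (d.insert k v).insert k (f x ((d.insert k v).getD k d0)) = _
      rw [PySem.Dict.getD_insert_self, PySem.Dict.insert_insert_self]
    rw [h1, ih]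

-- a non-empty chain of modifies at one key is one modify
lemma pvFoldl_modify_cons {κ : Type} [BEq κ] [LawfulBEq κ] (k : κ) (d0 : List Int)
    (f : Int → List Int → List Int) (x : Int) (xs : List Int) (d : PySem.Dict κ (List Int)) :
    (x :: xs).foldl (fun d i => d.modify k d0 (f i)) d
      = d.modify k d0 (fun v => (x :: xs).foldl (fun v i => f i v) v) := by
  simp only [List.foldl_cons]
  have h1 : d.modify k d0 (f x) = d.insert k (f x (d.getD k d0)) := rfl
  rw [h1, pvFoldl_insert_modify]
  rfl

-- writing one slot of a 60-slot row
lemma pvSet_map_range (f : Int → Int) (j v : Int) (h0 : 0 ≤ j) (h60 : j < 60) :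
    PySem.List.pySetD ((PySem.List.pyRange 0 60 1).map f) j v
      = (PySem.List.pyRange 0 60 1).map (fun m => if m = j then v else f m) := by
  rw [PySem.List.pySetD_of_nonneg _ _ h0]
  apply List.ext_getElem
  · simp [PySem.List.length_pyRange_one]
  · intro i hi hi'
    have hlen : i < 60 := by
      simpa [PySem.List.length_pyRange_one] using hi'
    rw [List.getElem_set, List.getElem_map, PySem.List.getElem_pyRange_one]
    by_cases hij : j.toNat = i
    · rw [if_pos hij, List.getElem_map, PySem.List.getElem_pyRange_one, if_pos (by omega)]
    · rw [if_neg hij, List.getElem_map, PySem.List.getElem_pyRange_one, if_neg (by omega)]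

-- pointwise description of the minute loop
lemma pvBumpF_eq_aux (s : Int) (hs : 0 ≤ s) :
    ∀ (n : Nat) (l : List Int), l.length = 60 → s + n ≤ 60 →
      pvBumpF s (s + n) l = (PySem.List.pyRange 0 60 1).map
        (fun m => PySem.List.pyGetD l m 0 + (if s ≤ m ∧ m < s + n then 1 else 0)) := by
  intro n
  induction n with
  | zero =>
    intro l hl _
    have hnil : PySem.List.pyRange s (s + ((0 : Nat) : Int)) 1 = [] :=
      PySem.List.pyRange_one_eq_nil (by omega)
    have hcongr : ∀ m ∈ PySem.List.pyRange 0 60 1,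
        PySem.List.pyGetD l m 0 + (if s ≤ m ∧ m < s + ((0 : Nat) : Int) then 1 else 0)
          = PySem.List.pyGetD l m 0 := by
      intro m _
      rw [if_neg (by omega)]
      ring
    have h60 : (60 : Int) = PySem.List.len l := by
      simp [PySem.List.len_eq, hl]
    simp only [pvBumpF, hnil, List.foldl_nil]
    rw [List.map_congr_left hcongr, h60, PySem.List.map_pyGetD_pyRange_zero]
  | succ n ih =>
    intro l hl hle
    have hcast : s + (((n : Nat) + 1 : Nat) : Int) = (s + n) + 1 := by push_cast; omega
    have hb : s ≤ s + n := by omega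
    have hrange : PySem.List.pyRange s (s + (((n : Nat) + 1 : Nat) : Int)) 1
        = PySem.List.pyRange s (s + n) 1 ++ [s + n] := by
      rw [hcast]; exact PySem.List.pyRange_one_succ_right hb
    have hprev := ih l hl (by omega)
    simp only [pvBumpF] at hprev ⊢
    rw [hrange, List.foldl_append, List.foldl_cons, List.foldl_nil, hprev]
    have hj0 : (0 : Int) ≤ s + n := by omega
    rw [PySem.List.pyGetD_map_pyRange_of_nonneg _ 60 _ 0 hj0 (by omega)]
    rw [pvSet_map_range _ _ _ hj0 (by omega)]
    apply List.map_congr_left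
    intro m hm
    have hm' : 0 ≤ m ∧ m < 60 := (PySem.List.mem_pyRange_one).1 hm
    by_cases hmj : m = s + n
    · rw [hmj]
      rw [if_pos rfl, if_neg (by omega), if_pos (by constructor <;> omega)]
      ring
    · rw [if_neg hmj]
      by_cases h4 : s ≤ m ∧ m < s + (n : Int)
      · rw [if_pos h4, if_pos (by push_cast; omega)]
      · rw [if_neg h4, if_neg (by push_cast; omega)]

lemma pvBumpF_eq (s e : Int) (hs : 0 ≤ s) (hse : s < e) (he : e ≤ 60) (l : List Int)
    (hl : l.length = 60) :
    pvBumpF s e l = (PySem.List.pyRange 0 60 1).map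
      (fun m => PySem.List.pyGetD l m 0 + (if s ≤ m ∧ m < e then 1 else 0)) := by
  have hn : e = s + (((e - s).toNat : Nat) : Int) := by omega
  rw [hn]
  exact pvBumpF_eq_aux s hs (e - s).toNat l hl (by omega)

-- B's row update matches A's minute loop
lemma pvRow_append (s e : Int) (hs : 0 ≤ s) (hse : s < e) (he : e ≤ 60) (ivs : List (Int × Int)) :
    pvRow (ivs ++ [(s, e)]) = pvBumpF s e (pvRow ivs) := by
  rw [pvBumpF_eq s e hs hse he (pvRow ivs) (pvLen_row ivs)]
  unfold pvRow
  apply List.map_congr_left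
  intro m hm
  rw [PySem.List.pyGetD_map_pyRange_of_nonneg _ 60 _ 0 ((PySem.List.mem_pyRange_one).1 hm).1
    ((PySem.List.mem_pyRange_one).1 hm).2]
  simp [List.sum_append]

lemma pvKeys_eq (dB : PySem.Dict String (List (Int × Int))) (dA : PySem.Dict String (List Int))
    (h : dA.items = dB.items.map pvG) : dA.keys = dB.keys := by
  simp only [PySem.Dict.keys, h, List.map_map]
  rfl

-- the collapsed form of A's wake-event update
lemma pvWake_collapse (c : String) (dA : PySem.Dict String (List Int)) (s e : Int)
    (hse : s < e) :
    (PySem.List.pyRange s e 1).foldl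
      (fun d i => d.modify c (List.replicate 60 0)
        (fun l => PySem.List.pySetD l i (PySem.List.pyGetD l i 0 + 1))) dA
      = dA.modify c (List.replicate 60 0) (pvBumpF s e) := by
  rw [PySem.List.pyRange_one_cons hse, pvFoldl_modify_cons]
  unfold pvBumpF
  rw [PySem.List.pyRange_one_cons hse]

-- one wake event preserves the relation between the two dicts
lemma pvWake_items (dA : PySem.Dict String (List Int))
    (dB : PySem.Dict String (List (Int × Int))) (c : String) (s e : Int)
    (h : dA.items = dB.items.map pvG) (hnd : dB.keys.Nodup)
    (hs : 0 ≤ s) (hse : s < e) (he : e ≤ 60) :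
    (dA.modify c (List.replicate 60 0) (pvBumpF s e)).items
      = ((dB.modify c [] (fun l => l ++ [(s, e)])).items).map pvG
      ∧ (dB.modify c [] (fun l => l ++ [(s, e)])).keys.Nodup := by
  have hkeys : dA.keys = dB.keys := pvKeys_eq dB dA h
  have hndA : dA.keys.Nodup := hkeys ▸ hnd
  have hA : dA.modify c (List.replicate 60 0) (pvBumpF s e)
      = dA.insert c (pvBumpF s e (dA.getD c (List.replicate 60 0))) := rfl
  have hB : dB.modify c [] (fun l => l ++ [(s, e)])
      = dB.insert c (dB.getD c [] ++ [(s, e)]) := rfl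
  have hcc : dA.contains c = dB.contains c := by
    rw [PySem.Dict.contains_eq_decide_mem_keys, PySem.Dict.contains_eq_decide_mem_keys, hkeys]
  rw [hA, hB]
  by_cases hc : dB.contains c = true
  · have hcA : dA.contains c = true := by rw [hcc]; exact hc
    refine ⟨?_, ?_⟩
    · rw [PySem.Dict.items_insert_of_contains dA _ hcA,
        PySem.Dict.items_insert_of_contains dB _ hc, h, List.map_map, List.map_map]
      apply List.map_congr_left
      intro p hp
      simp only [Function.comp_apply]
      by_cases hpc : (p.1 == c) = true
      · have hpc' : p.1 = c := by simpa using hpc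
        have hmemB : (c, p.2) ∈ dB.items := by rw [← hpc']; exact hp
        have hgB : dB.getD c [] = p.2 := PySem.Dict.getD_of_mem_items dB hmemB hnd []
        have hmemA : (c, pvRow p.2) ∈ dA.items := by
          rw [h]
          have hx := List.mem_map_of_mem (f := pvG) hp
          rw [show pvG p = (c, pvRow p.2) by rw [← hpc']; rfl] at hx
          exact hx
        have hgA : dA.getD c (List.replicate 60 0) = pvRow p.2 :=
          PySem.Dict.getD_of_mem_items dA hmemA hndA _
        have hfst : ((pvG p).1 == c) = true := hpc
        rw [if_pos hfst, if_pos hpc, hgA, hgB]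
        show (c, pvBumpF s e (pvRow p.2)) = pvG (c, p.2 ++ [(s, e)])
        rw [show pvG (c, p.2 ++ [(s, e)]) = (c, pvRow (p.2 ++ [(s, e)])) from rfl,
          pvRow_append s e hs hse he]
      · have hfst : ¬ ((pvG p).1 == c) = true := hpc
        rw [if_neg hfst, if_neg hpc]
    · rw [PySem.Dict.keys_insert_of_contains dB _ hc]; exact hnd
  · have hc' : dB.contains c = false := by simpa using hc
    have hcA : dA.contains c = false := by rw [hcc]; exact hc'
    refine ⟨?_, ?_⟩
    · rw [PySem.Dict.items_insert_of_not_contains dA _ hcA,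
        PySem.Dict.items_insert_of_not_contains dB _ hc',
        PySem.Dict.getD_of_not_contains dA _ hcA,
        PySem.Dict.getD_of_not_contains dB _ hc', h, List.map_append]
      congr 1
      show [(c, pvBumpF s e (List.replicate 60 0))] = [pvG (c, [] ++ [(s, e)])]
      rw [show pvG (c, [] ++ [(s, e)]) = (c, pvRow ([] ++ [(s, e)])) from rfl,
        pvRow_append s e hs hse he, pvRow_nil]
    · exact PySem.Dict.nodup_keys_insert dB c _ hnd

-- main loop invariant: the two ports stay related while the per-line conditions hold
set_option maxHeartbeats 2000000 in
lemma pvLoop_inv (lines : List String) :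
    ∀ (past : List String) (dA : PySem.Dict String (List Int))
      (dB : PySem.Dict String (List (Int × Int)))
      (code : Option String) (sleep : Option Int),
      dA.items = dB.items.map pvG → dB.keys.Nodup →
      (∀ j (hj : j < lines.length), pvLineOk (past ++ lines.take j) lines[j]) →
      (past.any pvIsBegins = true → code.isSome = true) →
      (past.filter pvIsFalls ≠ [] → sleep = pvLastSleepTime? past) →
      (lines.foldl pvStepA (dA, code, sleep)).1.items
        = ((lines.foldl pvStepB (dB, code, sleep)).1.items).map pvG
        ∧ (lines.foldl pvStepB (dB, code, sleep)).1.keys.Nodup := by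
  induction lines with
  | nil => intro past dA dB code sleep h hnd _ _ _; exact ⟨h, hnd⟩
  | cons line0 rest ih =>
    intro past dA dB code sleep h hnd hq hcode hsleep
    have hq0 : pvLineOk past line0 := by simpa using hq 0 (by simp)
    have hq' : ∀ j (hj : j < rest.length),
        pvLineOk ((past ++ [line0]) ++ rest.take j) rest[j] := by
      intro j hj
      simpa [List.append_assoc] using hq (j + 1) (by simpa using Nat.succ_lt_succ hj)
    simp only [List.foldl_cons]
    by_cases h1 : PySem.Str.isIn " begins shift" (PySem.Str.rstrip line0) = true
    · have hfl : pvIsFalls line0 = false := by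
        simp only [pvIsFalls, pvIsBegins, h1, Bool.not_true, Bool.false_and]
      obtain ⟨part, hp⟩ := Option.isSome_iff_exists.mp (hq0.1 h1)
      have hsA : pvStepA (dA, code, sleep) line0
          = (dA, some (PySem.Str.replace part " begins shift" ""), sleep) := by
        rw [pvStepA.eq_def, if_pos h1, hp]
      have hsB : pvStepB (dB, code, sleep) line0
          = (dB, some (PySem.Str.replace part " begins shift" ""), sleep) := by
        rw [pvStepB.eq_def, pvParseEvent.eq_def, if_pos h1, hp]
        rfl
      rw [hsA, hsB]
      have hps : pvLastSleepTime? (past ++ [line0]) = pvLastSleepTime? past := by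
        simp [pvLastSleepTime?, List.filter_append, hfl]
      have hfe : (past ++ [line0]).filter pvIsFalls = past.filter pvIsFalls := by
        simp [List.filter_append, hfl]
      exact ih (past ++ [line0]) dA dB _ sleep h hnd hq' (fun _ => rfl)
        (fun hne => by rw [hps]; exact hsleep (by rwa [hfe] at hne))
    · have hb1 : pvIsBegins line0 = false := by
        simp only [pvIsBegins]; exact Bool.eq_false_iff.mpr h1
      by_cases h2 : PySem.Str.isIn " falls asleep" (PySem.Str.rstrip line0) = true
      · have hfl : pvIsFalls line0 = true := by
          simp only [pvIsFalls, hb1, Bool.not_false, Bool.true_and, h2]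
        obtain ⟨t, ht⟩ := Option.isSome_iff_exists.mp (hq0.2.1 hfl)
        have hsA : pvStepA (dA, code, sleep) line0 = (dA, code, some t) := by
          rw [pvStepA.eq_def, if_neg h1, if_pos h2, ht]
        have hsB : pvStepB (dB, code, sleep) line0 = (dB, code, some t) := by
          rw [pvStepB.eq_def, pvParseEvent.eq_def, if_neg h1, if_pos h2, ht]
          rfl
        rw [hsA, hsB]
        have hps : pvLastSleepTime? (past ++ [line0]) = some t := by
          simp only [pvLastSleepTime?, List.filter_append, List.filter_cons, hfl,
            List.filter_nil, if_true, List.getLastD_concat]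
          exact ht
        exact ih (past ++ [line0]) dA dB code (some t) h hnd hq'
          (fun hb => hcode (by simpa [List.any_append, hb1] using hb))
          (fun _ => by rw [hps])
      · have hc2 : PySem.Str.isIn " falls asleep" (PySem.Str.rstrip line0) = false :=
          Bool.eq_false_iff.mpr h2
        have hfl : pvIsFalls line0 = false := by
          simp only [pvIsFalls, hc2, Bool.and_false]
        have hps : pvLastSleepTime? (past ++ [line0]) = pvLastSleepTime? past := by
          simp [pvLastSleepTime?, List.filter_append, hfl]
        have hfe : (past ++ [line0]).filter pvIsFalls = past.filter pvIsFalls := by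
          simp [List.filter_append, hfl]
        have hsleepKeep : ∀ sl : Option Int,
            (past.filter pvIsFalls ≠ [] → sl = pvLastSleepTime? past) →
            ((past ++ [line0]).filter pvIsFalls ≠ [] → sl = pvLastSleepTime? (past ++ [line0])) :=
          fun sl hs hne => by rw [hps]; exact hs (by rwa [hfe] at hne)
        by_cases h3 : PySem.Str.isIn " wakes up" (PySem.Str.rstrip line0) = true
        · have hwk : pvIsWakes line0 = true := by
            simp only [pvIsWakes, hb1, hc2, h3, Bool.not_false, Bool.and_true, Bool.true_and]
          obtain ⟨hany, hne, hsl, hel, hbound⟩ := hq0.2.2 hwk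
          obtain ⟨e, ht⟩ := Option.isSome_iff_exists.mp hel
          obtain ⟨s, hs⟩ := Option.isSome_iff_exists.mp hsl
          have hsleq : sleep = some s := by rw [hsleep hne, hs]
          obtain ⟨c, hc⟩ := Option.isSome_iff_exists.mp (hcode hany)
          subst hsleq; subst hc
          rw [hs, ht] at hbound
          simp only [Option.getD_some] at hbound
          have hcode'' : (past ++ [line0]).any pvIsBegins = true →
              (some c : Option String).isSome = true := fun _ => rfl
          have hsleep'' : (past ++ [line0]).filter pvIsFalls ≠ [] →
              (some s : Option Int) = pvLastSleepTime? (past ++ [line0]) :=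
            fun _ => by rw [hps, ← hs]
          by_cases hse : s < e
          · obtain ⟨hs0, he60⟩ := hbound hse
            have hsA : pvStepA (dA, some c, some s) line0
                = ((PySem.List.pyRange s e 1).foldl
                    (fun d i => d.modify c (List.replicate 60 0)
                      (fun l => PySem.List.pySetD l i (PySem.List.pyGetD l i 0 + 1))) dA,
                   some c, some s) := by
              rw [pvStepA.eq_def, if_neg h1, if_neg h2, if_pos h3, ht]
            have hsB0 : pvStepB (dB, some c, some s) line0
                = pvApplyEvent (dB, some c, some s) (PvEvent.wake e) := by
              rw [pvStepB.eq_def, pvParseEvent.eq_def, if_neg h1, if_neg h2, if_pos h3, ht]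
              rfl
            have hsB : pvStepB (dB, some c, some s) line0
                = (dB.modify c [] (fun l => l ++ [(s, e)]), some c, some s) := by
              rw [hsB0]
              show (if s < e then _ else _) = _
              rw [if_pos hse]
            rw [hsA, hsB, pvWake_collapse c dA s e hse]
            obtain ⟨h', hnd'⟩ := pvWake_items dA dB c s e h hnd hs0 hse he60
            exact ih (past ++ [line0]) _ _ (some c) (some s) h' hnd' hq' hcode'' hsleep''
          · have hnil : PySem.List.pyRange s e 1 = [] :=
              PySem.List.pyRange_one_eq_nil (by omega)
            have hsA0 : pvStepA (dA, some c, some s) line0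
                = ((PySem.List.pyRange s e 1).foldl
                    (fun d i => d.modify c (List.replicate 60 0)
                      (fun l => PySem.List.pySetD l i (PySem.List.pyGetD l i 0 + 1))) dA,
                   some c, some s) := by
              rw [pvStepA.eq_def, if_neg h1, if_neg h2, if_pos h3, ht]
            have hsA : pvStepA (dA, some c, some s) line0 = (dA, some c, some s) := by
              rw [hsA0, hnil, List.foldl_nil]
            have hsB0 : pvStepB (dB, some c, some s) line0
                = pvApplyEvent (dB, some c, some s) (PvEvent.wake e) := by
              rw [pvStepB.eq_def, pvParseEvent.eq_def, if_neg h1, if_neg h2, if_pos h3, ht]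
              rfl
            have hsB : pvStepB (dB, some c, some s) line0 = (dB, some c, some s) := by
              rw [hsB0]
              show (if s < e then _ else _) = _
              rw [if_neg hse]
            rw [hsA, hsB]
            exact ih (past ++ [line0]) dA dB (some c) (some s) h hnd hq' hcode'' hsleep''
        · have hsA : pvStepA (dA, code, sleep) line0 = (dA, code, sleep) := by
            rw [pvStepA.eq_def, if_neg h1, if_neg h2, if_neg h3]
          have hsB : pvStepB (dB, code, sleep) line0 = (dB, code, sleep) := by
            rw [pvStepB.eq_def, pvParseEvent.eq_def, if_neg h1, if_neg h2, if_neg h3]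
          rw [hsA, hsB]
          exact ih (past ++ [line0]) dA dB code sleep h hnd hq'
            (fun hb => hcode (by simpa [List.any_append, hb1] using hb))
            (hsleepKeep sleep hsleep)

-- ===== VERDICT (by name: the statement is the Claim_ definition above) =====
theorem parse_guard_sleeps_spec : Claim_equal_parse_guard_sleeps := by
  unfold Claim_equal_parse_guard_sleeps
  intro chrono _ hpre
  unfold Pre_parse_guard_sleeps at hpre
  unfold Spec_parse_guard_sleeps parse_guard_sleeps parse_guard_sleeps_alt
  simp only [pvFoldl_stepB]
  obtain ⟨hitems, hnd⟩ := pvLoop_inv (PySem.List.sorted chrono (fun s => s) false) []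
    PySem.Dict.empty PySem.Dict.empty none none rfl
    (PySem.Dict.nodup_keys_empty (κ := String) (ν := List (Int × Int)))
    (fun j hj => by simpa using hpre j hj)
    (fun hb => by simp at hb)
    (fun hne => by simp at hne)
  rw [hitems]
  rw [PySem.Dict.items_foldl_insert_fresh
    ((PySem.List.sorted chrono (fun s => s) false).foldl pvStepB
      (PySem.Dict.empty, none, none)).1.items
    (fun p => p.1) (fun p => pvRow p.2) PySem.Dict.empty
    (fun a _ => PySem.Dict.contains_empty a.1)
    (by simpa [PySem.Dict.keys] using hnd)]
  rfl
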